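-- pv_equiv track=rewrite | github.com/gn874682003/Explainable-Prediction-Framework | EHP/DivideData.py | DividData5
-- ===== SOURCE A (Python) =====
-- def DividData5(orginal_trace):
--     traceNum = len(orginal_trace)
--     Train = []
--     Test = []
--     for i in range(5):
--         secNum = int(traceNum / 25)
--         for j in range(i * secNum * 5, i * secNum * 5 + secNum):
--             Test.append(orginal_trace[j])
--         for j in range(i * secNum * 5 + secNum, (i + 1) * secNum * 5):
--             Train.append(orginal_trace[j])
--     return Train, Test,
-- ===== SOURCE B (Python) =====
-- def DividData5(orginal_trace):
--     secNum = len(orginal_trace) // 25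
--     sections = [orginal_trace[k * secNum:(k + 1) * secNum] for k in range(25)]
--     pattern = [True, False, False, False, False] * 5
--     Train, Test = [], []
--     for is_test, sec in zip(pattern, sections):
--         (Test if is_test else Train).extend(sec)
--     return Train, Test
-- ===== Notes on version B (the rewrite author's own statement) =====
-- stated objective: alternative
-- what changed: Instead of nested index loops appending element-by-element, B slices the trace into 25 equal sections, tags them with a cyclic [True,False,False,False,False]*5 pattern via zip, and extends Test/Train with whole sections.
import Mathlib
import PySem

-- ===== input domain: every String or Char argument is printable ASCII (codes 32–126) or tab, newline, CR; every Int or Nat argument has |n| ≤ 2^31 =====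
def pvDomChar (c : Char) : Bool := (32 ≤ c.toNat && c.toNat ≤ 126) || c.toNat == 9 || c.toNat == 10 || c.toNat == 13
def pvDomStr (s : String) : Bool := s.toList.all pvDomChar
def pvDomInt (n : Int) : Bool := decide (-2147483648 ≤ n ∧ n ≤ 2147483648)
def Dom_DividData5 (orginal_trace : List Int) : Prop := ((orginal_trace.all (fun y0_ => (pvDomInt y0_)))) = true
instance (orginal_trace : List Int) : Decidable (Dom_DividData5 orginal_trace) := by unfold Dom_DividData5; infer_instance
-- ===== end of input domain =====

-- B replaces A's index arithmetic and nested per-element loops by slicing the trace into 25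
-- equal sections and tagging them with a cyclic True/False pattern (objective: alternative).

-- ===== PORT A =====
-- int(traceNum / 25): traceNum = len ≥ 0, so float-truncation = floor division (exact on the
-- admitted lengths). orginal_trace[j] is always in range (j < 25*secNum ≤ len), so pyGetD with
-- default 0 never takes the default.
def DividData5 (orginal_trace : List Int) : List Int × List Int :=
  let traceNum : Int := orginal_trace.length
  (PySem.List.pyRange 0 5 1).foldl
    (fun (st : List Int × List Int) i =>
      let secNum : Int := PySem.Int.floordiv traceNum 25
      let test := (PySem.List.pyRange (i * secNum * 5) (i * secNum * 5 + secNum) 1).foldl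
        (fun acc j => acc ++ [PySem.List.pyGetD orginal_trace j 0]) st.2
      let train := (PySem.List.pyRange (i * secNum * 5 + secNum) ((i + 1) * secNum * 5) 1).foldl
        (fun acc j => acc ++ [PySem.List.pyGetD orginal_trace j 0]) st.1
      (train, test))
    ([], [])

-- ===== PORT B =====
def DividData5_alt (orginal_trace : List Int) : List Int × List Int :=
  let secNum : Int := PySem.Int.floordiv (orginal_trace.length : Int) 25
  let sections := (PySem.List.pyRange 0 25 1).map
    (fun k => PySem.List.slice orginal_trace (some (k * secNum)) (some ((k + 1) * secNum)))
  let pattern := (List.replicate 5 [true, false, false, false, false]).flatten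
  (pattern.zip sections).foldl
    (fun (st : List Int × List Int) p =>
      if p.1 then (st.1, st.2 ++ p.2) else (st.1 ++ p.2, st.2))
    ([], [])

-- ===== PRECONDITION & SPEC =====
def Spec_DividData5 (orginal_trace : List Int) (out : List Int × List Int) : Prop := out = DividData5_alt orginal_trace
instance (orginal_trace : List Int) (out : List Int × List Int) : Decidable (Spec_DividData5 orginal_trace out) := by unfold Spec_DividData5; infer_instance

-- ===== CLAIM (what is proved, stated in full; the proofs are below) =====
def Claim_equal_DividData5 : Prop := ∀ (orginal_trace : List Int), Dom_DividData5 orginal_trace → Spec_DividData5 orginal_trace (DividData5 orginal_trace)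

-- ===== LEMMAS AND PROOFS =====

-- A's per-element gather over an in-range index range IS the slice B takes.
theorem pvMapRange_eq_slice (t : List Int) (a b : Int)
    (ha : 0 ≤ a) (hab : a ≤ b) (hb : b ≤ (t.length : Int)) :
    (PySem.List.pyRange a b 1).map (fun j => PySem.List.pyGetD t j 0)
      = PySem.List.slice t (some a) (some b) := by
  rw [PySem.List.slice_toNat t ha (by linarith)]
  apply List.ext_getElem
  · simp [PySem.List.length_pyRange_one]
    omega
  · intro k h1 h2
    simp only [List.getElem_map]
    rw [PySem.List.getElem_pyRange_one a b k (by simpa using h1)]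
    have hk : (k : Int) < b - a := by
      have := h1; simp [PySem.List.length_pyRange_one] at this; omega
    rw [PySem.List.pyGetD_eq_getElem t 0 (by omega) (by omega)]
    simp only [List.getElem_take, List.getElem_drop]
    congr 1
    omega

theorem DividData5_eq (t : List Int) : DividData5 t = DividData5_alt t := by
  unfold DividData5 DividData5_alt
  have hdef : PySem.Int.floordiv ((t.length : Int)) 25 = (t.length : Int) / 25 :=
    PySem.Int.floordiv_eq_ediv_of_pos (by norm_num)
  set s := PySem.Int.floordiv ((t.length : Int)) 25 with hsdef
  have hs : 0 ≤ s := by rw [hdef]; omega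
  have hlen : 25 * s ≤ (t.length : Int) := by rw [hdef]; omega
  rw [show PySem.List.pyRange 0 5 1 = [(0:Int),1,2,3,4] from by decide,
      show PySem.List.pyRange 0 25 1 =
        [(0:Int),1,2,3,4,5,6,7,8,9,10,11,12,13,14,15,16,17,18,19,20,21,22,23,24] from by decide]
  simp only [List.foldl_cons, List.foldl_nil, PySem.List.foldl_append_singleton_eq_map,
    List.nil_append, List.map_cons, List.map_nil, List.replicate, List.flatten,
    List.append_eq, List.cons_append, List.zip_cons_cons,
    List.zip_nil_right, Bool.false_eq_true, ite_true, ite_false, List.append_nil]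
  simp only [← hsdef]
  -- B's section slices are the per-element gathers over unit ranges
  have key' : ∀ k : Int, 0 ≤ k → k ≤ 24 →
      (PySem.List.pyRange (k * s) ((k + 1) * s) 1).map (fun j => PySem.List.pyGetD t j 0)
        = PySem.List.slice t (some (k * s)) (some ((k + 1) * s)) := by
    intro k hk0 hk1
    exact pvMapRange_eq_slice t (k * s) ((k + 1) * s)
      (by nlinarith) (by nlinarith) (by nlinarith)
  rw [← key' 0 (by norm_num) (by norm_num), ← key' 1 (by norm_num) (by norm_num),
      ← key' 2 (by norm_num) (by norm_num), ← key' 3 (by norm_num) (by norm_num),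
      ← key' 4 (by norm_num) (by norm_num), ← key' 5 (by norm_num) (by norm_num),
      ← key' 6 (by norm_num) (by norm_num), ← key' 7 (by norm_num) (by norm_num),
      ← key' 8 (by norm_num) (by norm_num), ← key' 9 (by norm_num) (by norm_num),
      ← key' 10 (by norm_num) (by norm_num), ← key' 11 (by norm_num) (by norm_num),
      ← key' 12 (by norm_num) (by norm_num), ← key' 13 (by norm_num) (by norm_num),
      ← key' 14 (by norm_num) (by norm_num), ← key' 15 (by norm_num) (by norm_num),
      ← key' 16 (by norm_num) (by norm_num), ← key' 17 (by norm_num) (by norm_num),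
      ← key' 18 (by norm_num) (by norm_num), ← key' 19 (by norm_num) (by norm_num),
      ← key' 20 (by norm_num) (by norm_num), ← key' 21 (by norm_num) (by norm_num),
      ← key' 22 (by norm_num) (by norm_num), ← key' 23 (by norm_num) (by norm_num),
      ← key' 24 (by norm_num) (by norm_num)]
  -- split each of A's Train ranges (length 4s) into four unit-section ranges
  have hsplit2 : ∀ k : Int, 0 ≤ k →
      PySem.List.pyRange (k * s * 5 + s) ((k + 1) * s * 5) 1
        = PySem.List.pyRange (k * s * 5 + s) (k * s * 5 + s + s) 1
          ++ PySem.List.pyRange (k * s * 5 + s + s) (k * s * 5 + s + s + s) 1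
          ++ PySem.List.pyRange (k * s * 5 + s + s + s) (k * s * 5 + s + s + s + s) 1
          ++ PySem.List.pyRange (k * s * 5 + s + s + s + s) ((k + 1) * s * 5) 1 := by
    intro k hk
    rw [PySem.List.pyRange_one_append (k * s * 5 + s) (k * s * 5 + s + s) ((k + 1) * s * 5)
          (by linarith) (by nlinarith),
        PySem.List.pyRange_one_append (k * s * 5 + s + s) (k * s * 5 + s + s + s) ((k + 1) * s * 5)
          (by linarith) (by nlinarith),
        PySem.List.pyRange_one_append (k * s * 5 + s + s + s) (k * s * 5 + s + s + s + s) ((k + 1) * s * 5)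
          (by linarith) (by nlinarith)]
    simp [List.append_assoc]
  rw [hsplit2 0 (by norm_num), hsplit2 1 (by norm_num), hsplit2 2 (by norm_num),
      hsplit2 3 (by norm_num), hsplit2 4 (by norm_num)]
  simp only [List.map_append, List.append_assoc]
  rw [Prod.mk.injEq]
  constructor <;> ring_nf

-- ===== VERDICT (by name: the statement is the Claim_ definition above) =====
theorem DividData5_spec : Claim_equal_DividData5 := by
  intro t _
  unfold Spec_DividData5
  exact DividData5_eq t
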